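-- pv_equiv track=rewrite | github.com/hipotures/vocatio | scripts/pipeline/build_vlm_photo_boundary_gui_index.py | choose_segment_type
-- ===== SOURCE A (Python) =====
-- from typing import Any, Dict, List, Mapping, Optional, Sequence
--
-- def choose_segment_type(candidates: Sequence[str]) -> str:
--     normalized_candidates = [value for value in candidates if value]
--     if not normalized_candidates:
--         return ""
--     counts: Dict[str, int] = {}
--     for value in normalized_candidates:
--         counts[value] = counts.get(value, 0) + 1
--     ranked = sorted(counts.items(), key=lambda item: (-item[1], item[0]))
--     if len(ranked) > 1 and ranked[0][1] == ranked[1][1]: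
--         return ""
--     return ranked[0][0]
-- ===== SOURCE B (Python) =====
-- def choose_segment_type(candidates):
--     counts = {}
--     for value in candidates:
--         if value:
--             counts[value] = counts.get(value, 0) + 1
--     if not counts:
--         return ""
--     best = max(counts.values())
--     winners = [key for key, count in counts.items() if count == best]
--     if len(winners) == 1:
--         return winners[0]
--     return ""
-- ===== Notes on version B (the rewrite author's own statement) =====
-- stated objective: alternative
-- what changed: Replaces the separate filter pass plus the sort of the frequency table and top-two comparison with a single counting pass, a linear max over the counts, and a uniqueness check of the maximal key (any tie at the top yields '', so no ordering is needed).
import Mathlib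
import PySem

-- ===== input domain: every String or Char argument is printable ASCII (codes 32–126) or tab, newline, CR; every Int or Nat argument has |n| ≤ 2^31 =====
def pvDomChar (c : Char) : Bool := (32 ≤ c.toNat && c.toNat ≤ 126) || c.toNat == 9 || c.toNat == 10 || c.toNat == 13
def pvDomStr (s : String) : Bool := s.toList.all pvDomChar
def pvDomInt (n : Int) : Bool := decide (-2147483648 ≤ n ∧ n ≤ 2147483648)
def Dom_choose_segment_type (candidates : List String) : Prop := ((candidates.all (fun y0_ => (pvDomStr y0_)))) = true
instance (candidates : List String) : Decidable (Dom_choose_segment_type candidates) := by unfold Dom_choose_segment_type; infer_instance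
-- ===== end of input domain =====

-- B fuses the filter into one counting pass and replaces the sort of the frequency table + top-two
-- comparison by a linear max over the counts and a uniqueness check of the maximal key (any tie at
-- the top yields "", so no ordering of the table is needed).

-- ===== PORT A =====
def choose_segment_type (candidates : List String) : String :=
  let normalized_candidates := candidates.filter (fun value => !(value == ""))
  if normalized_candidates = [] then ""
  else
    let counts : PySem.Dict String Int :=
      normalized_candidates.foldl (fun d value => d.insert value (d.getD value 0 + 1)) PySem.Dict.empty
    let ranked := PySem.List.sorted2 counts.items (fun item => -item.2) (fun item => item.1)
    if PySem.List.len ranked > 1 ∧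
        (PySem.List.pyGetD ranked 0 ("", 0)).2 = (PySem.List.pyGetD ranked 1 ("", 0)).2 then ""
    else (PySem.List.pyGetD ranked 0 ("", 0)).1

-- ===== PORT B =====
def choose_segment_type_alt (candidates : List String) : String :=
  let counts : PySem.Dict String Int :=
    candidates.foldl
      (fun d value => if !(value == "") then d.insert value (d.getD value 0 + 1) else d)
      PySem.Dict.empty
  if PySem.Dict.size counts = 0 then ""
  else
    match PySem.List.max? counts.values (fun x => x) with
    | none => ""    -- unreachable guard: counts is nonempty here, so Python's max gets a nonempty sequence
    | some best =>
      let winners := (counts.items.filter (fun p => p.2 == best)).map (fun p => p.1)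
      match winners with
      | [w] => w
      | _ => ""

-- ===== PRECONDITION & SPEC =====
def Spec_choose_segment_type (candidates : List String) (out : String) : Prop := out = choose_segment_type_alt candidates
instance (candidates : List String) (out : String) : Decidable (Spec_choose_segment_type candidates out) := by unfold Spec_choose_segment_type; infer_instance

-- ===== CLAIM (what is proved, stated in full; the proofs are below) =====
def Claim_equal_choose_segment_type : Prop := ∀ (candidates : List String), Dom_choose_segment_type candidates → Spec_choose_segment_type candidates (choose_segment_type candidates)

-- ===== LEMMAS AND PROOFS =====

-- B's guarded counting loop is the counting loop over the filtered list.
theorem foldl_count_filter (l : List String) (d : PySem.Dict String Int) :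
    l.foldl (fun d value => if !(value == "") then d.insert value (d.getD value 0 + 1) else d) d
      = (l.filter (fun value => !(value == ""))).foldl
          (fun d value => d.insert value (d.getD value 0 + 1)) d := by
  induction l generalizing d with
  | nil => rfl
  | cons x t ih =>
    simp only [List.foldl_cons, List.filter_cons]
    cases hx : (x == "") <;>
      simp only [Bool.not_true, Bool.not_false, if_true] <;>
      exact ih _

-- sorted2 with keys (-count, key) is sorted with the single lexicographic key into Int ×ₗ String.
theorem sorted2_eq_sorted_lex (xs : List (String × Int)) :
    PySem.List.sorted2 xs (fun item => -item.2) (fun item => item.1)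
      = PySem.List.sorted xs (fun item => toLex ((-item.2 : Int), item.1)) := by
  rw [PySem.List.sorted_eq_foldl_insertBy]
  show List.foldl (fun acc x => PySem.List.insertBy _ x acc) [] xs = _
  congr 1
  funext acc x
  simp only [Prod.Lex.toLex_lt_toLex]
  congr 1
  funext p q
  rcases lt_trichotomy (p.2 : Int) q.2 with h | h | h
  · simp [h, not_lt_of_gt h, ne_of_lt h]
  · simp [h]
  · simp [h, not_lt_of_gt h, ne_of_gt h]

theorem lex_le_snd {p q : String × Int}
    (h : toLex ((-p.2 : Int), p.1) ≤ toLex ((-q.2 : Int), q.1)) : q.2 ≤ p.2 := by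
  rcases Prod.Lex.toLex_le_toLex.mp h with h' | ⟨h', _⟩ <;> omega

theorem tails_eq (its : List (String × Int)) (hne : its ≠ [])
    (hnd : (its.map Prod.fst).Nodup) :
    (if PySem.List.len (PySem.List.sorted2 its (fun item => -item.2) (fun item => item.1)) > 1 ∧
        (PySem.List.pyGetD (PySem.List.sorted2 its (fun item => -item.2) (fun item => item.1)) 0 ("", 0)).2 =
        (PySem.List.pyGetD (PySem.List.sorted2 its (fun item => -item.2) (fun item => item.1)) 1 ("", 0)).2 then ""
     else (PySem.List.pyGetD (PySem.List.sorted2 its (fun item => -item.2) (fun item => item.1)) 0 ("", 0)).1)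
      = (match PySem.List.max? (its.map Prod.snd) (fun x => x) with
         | none => ""
         | some best =>
           match (its.filter (fun p => p.2 == best)).map (fun p => p.1) with
           | [w] => w
           | _ => "") := by


  rw [sorted2_eq_sorted_lex]
  set key : String × Int → Lex (Int × String) := fun item => toLex ((-item.2 : Int), item.1) with hkey
  set ranked := PySem.List.sorted its key with hranked
  have hperm : ranked.Perm its := PySem.List.sorted_perm its key false
  have hrne : ranked ≠ [] := by
    intro h; exact hne ((PySem.List.sorted_eq_nil_iff its key false).mp h)
  obtain ⟨r0, rest, hr⟩ := List.exists_cons_of_ne_nil hrne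
  have hhead : ∀ y ∈ its, key r0 ≤ key y := PySem.List.key_head_sorted_le its key hr
  obtain ⟨best, hbest⟩ : ∃ b, PySem.List.max? (its.map Prod.snd) (fun x => x) = some b := by
    rcases h : PySem.List.max? (its.map Prod.snd) (fun x => x) with _ | b
    · rw [PySem.List.max?_eq_none_iff] at h; exact absurd (List.map_eq_nil_iff.mp h) hne
    · exact ⟨b, rfl⟩
  have hmax : ∀ y ∈ its.map Prod.snd, y ≤ best := fun y hy => PySem.List.max?_isMax hbest y hy
  have hmem : best ∈ its.map Prod.snd := PySem.List.max?_mem hbest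
  have hr0mem : r0 ∈ its := hperm.mem_iff.mp (by simp [hr])
  have hr0best : r0.2 = best := by
    obtain ⟨q, hq, hq2⟩ := List.mem_map.mp hmem
    have h1 : r0.2 ≤ best := hmax r0.2 (List.mem_map.mpr ⟨r0, hr0mem, rfl⟩)
    have h2 : best ≤ r0.2 := hq2 ▸ lex_le_snd (hhead q hq)
    omega
  have hpair := PySem.List.sorted_pairwise its key
  rw [← hranked, hr] at hpair
  have hfperm := hperm.filter (fun p => p.2 == best)
  cases rest with
  | nil =>
    have hits : its = [r0] := List.perm_singleton.mp (hr ▸ hperm).symm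
    subst hits
    rw [hr]
    simp only [hbest]
    rw [if_neg (by simp [PySem.List.len_eq])]
    simp [pysem, hr0best]
  | cons r1 rest' =>
    have hget0 : PySem.List.pyGetD ranked 0 ("", 0) = r0 := by rw [hr]; simp [pysem]
    have hget1 : PySem.List.pyGetD ranked 1 ("", 0) = r1 := by rw [hr]; simp [pysem]
    have hlen : PySem.List.len ranked > 1 := by
      rw [hr, PySem.List.len_eq]; simp
    rw [hget0, hget1]
    rcases List.pairwise_cons.mp hpair with ⟨h0all, hpair2⟩
    rcases List.pairwise_cons.mp hpair2 with ⟨h1all, _⟩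
    by_cases hc : r0.2 = r1.2
    · rw [if_pos ⟨hlen, hc⟩]
      have h2 : 2 ≤ (its.filter (fun p => p.2 == best)).length := by
        rw [← hfperm.length_eq, hr]
        simp only [List.filter_cons, beq_iff_eq, hr0best, ← hc]
        simp
      obtain ⟨a, b, t, hab⟩ : ∃ a b t, its.filter (fun p => p.2 == best) = a :: b :: t := by
        rcases l : its.filter (fun p => p.2 == best) with _ | ⟨a, _ | ⟨b, t⟩⟩
        · rw [l] at h2; simp at h2
        · rw [l] at h2; simp at h2
        · exact ⟨a, b, t, l⟩
      simp [hbest, hab]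
    · rw [if_neg (fun h => hc h.2)]
      have hr1lt : r1.2 < best := by
        have := lex_le_snd (h0all r1 (by simp))
        omega
      have hfr : ranked.filter (fun p => p.2 == best) = [r0] := by
        rw [hr, List.filter_cons_of_pos (by simp [hr0best]),
            List.filter_cons_of_neg (by simp; omega),
            List.filter_eq_nil_iff.mpr ?_]
        intro y hy
        have := lex_le_snd (h1all y hy)
        simp
        omega
      have hfits : its.filter (fun p => p.2 == best) = [r0] :=
        List.perm_singleton.mp (hfr ▸ hfperm).symm
      simp [hbest, hfits]

-- ===== VERDICT (by name: the statement is the Claim_ definition above) =====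
theorem choose_segment_type_spec : Claim_equal_choose_segment_type := by
  intro candidates _
  unfold Spec_choose_segment_type choose_segment_type choose_segment_type_alt
  simp only [foldl_count_filter, PySem.Dict.foldl_insert_getD_add_one_eq_counter]
  set L := candidates.filter (fun value => !(value == "")) with hL
  by_cases h : L = []
  · rw [if_pos h, h]; rfl
  · rw [if_neg h]
    have hne : (PySem.Dict.counter L).items ≠ [] := by
      obtain ⟨x, t, hx⟩ := List.exists_cons_of_ne_nil h
      rw [PySem.Dict.items_counter]
      intro hcon
      have : x ∈ PySem.Set.ofList L := (PySem.Set.mem_ofList L x).mpr (by rw [hx]; simp)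
      rw [List.map_eq_nil_iff.mp hcon] at this
      simp at this
    have hsz : ¬ PySem.Dict.size (PySem.Dict.counter L) = 0 := by
      intro hcon
      exact hne (List.length_eq_zero_iff.mp hcon)
    rw [if_neg hsz]
    have hnd : ((PySem.Dict.counter L).items.map Prod.fst).Nodup :=
      PySem.Dict.nodup_keys_counter L
    have hv : (PySem.Dict.counter L).values = (PySem.Dict.counter L).items.map Prod.snd := rfl
    rw [hv]
    exact tails_eq (PySem.Dict.counter L).items hne hnd
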